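-- pv_equiv track=rewrite | github.com/nevetsagetro/OKR-warranted | src/own_knowledge_rag/api.py | _is_multi_fact_or_comparison_review
-- ===== SOURCE A (Python) =====
-- def _is_multi_fact_or_comparison_review(entry: dict[str, object]) -> bool:
--     question = str(entry.get("question", "")).lower()
--     markers = [
--         " compare ",
--         " comparison ",
--         " difference ",
--         " differences ",
--         " vs ",
--         " versus ",
--         " both ",
--         " and ",
--         " across ",
--     ]
--     padded = f" {question} "
--     return any(marker in padded for marker in markers)
-- ===== SOURCE B (Python) =====
-- def _is_multi_fact_or_comparison_review(entry: dict[str, object]) -> bool: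
--     marker_words = {
--         "compare", "comparison", "difference", "differences",
--         "vs", "versus", "both", "and", "across",
--     }
--     tokens = set(str(entry.get("question", "")).lower().split(" "))
--     return any(w in tokens for w in marker_words)
-- ===== Notes on version B (the rewrite author's own statement) =====
-- stated objective: idiomatic
-- what changed: Instead of scanning the padded question nine times for space-padded substrings, B splits the question once on the literal space into a token set and tests the nine bare marker words by set membership.
import Mathlib
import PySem

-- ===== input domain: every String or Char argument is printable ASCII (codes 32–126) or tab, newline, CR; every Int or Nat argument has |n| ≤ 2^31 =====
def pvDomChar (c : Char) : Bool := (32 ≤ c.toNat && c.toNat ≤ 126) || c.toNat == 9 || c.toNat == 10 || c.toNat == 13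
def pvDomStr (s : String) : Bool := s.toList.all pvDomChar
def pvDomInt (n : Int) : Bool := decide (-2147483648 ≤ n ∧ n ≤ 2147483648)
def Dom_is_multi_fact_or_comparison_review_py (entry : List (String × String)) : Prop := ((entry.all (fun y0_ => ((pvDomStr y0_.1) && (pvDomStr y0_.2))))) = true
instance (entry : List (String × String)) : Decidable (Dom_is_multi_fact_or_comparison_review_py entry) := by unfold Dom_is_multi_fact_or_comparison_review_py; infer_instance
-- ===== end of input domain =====

-- B replaces nine padded-substring scans of the question by one split on the literal space
-- into a token set plus membership tests of the nine bare marker words (idiomatic rewrite).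

-- ===== PORT A =====
-- the dict is an association list; .get("question", "") = first-match lookup with default
def is_multi_fact_or_comparison_review_py (entry : List (String × String)) : Bool :=
  let question := PySem.Chars.lower ((entry.lookup "question").getD "").toList
  let markers : List (List Char) :=
    [" compare ".toList, " comparison ".toList, " difference ".toList, " differences ".toList,
     " vs ".toList, " versus ".toList, " both ".toList, " and ".toList, " across ".toList]
  let padded := [' '] ++ question ++ [' ']
  markers.any (fun marker => PySem.Chars.isIn marker padded)

-- ===== PORT B =====
def pvMarkerWords : List (List Char) :=
  ["compare".toList, "comparison".toList, "difference".toList, "differences".toList,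
   "vs".toList, "versus".toList, "both".toList, "and".toList, "across".toList]

def is_multi_fact_or_comparison_review_py_alt (entry : List (String × String)) : Bool :=
  let markerWords : PySem.Set (List Char) := PySem.Set.ofList pvMarkerWords
  let tokens : PySem.Set (List Char) :=
    PySem.Set.ofList (PySem.Chars.splitOn
      (PySem.Chars.lower ((entry.lookup "question").getD "").toList) [' '])
  markerWords.any (fun w => tokens.contains w)

-- ===== PRECONDITION & SPEC =====
def Spec_is_multi_fact_or_comparison_review_py (entry : List (String × String)) (out : Bool) : Prop := out = is_multi_fact_or_comparison_review_py_alt entry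
instance (entry : List (String × String)) (out : Bool) : Decidable (Spec_is_multi_fact_or_comparison_review_py entry out) := by unfold Spec_is_multi_fact_or_comparison_review_py; infer_instance

-- ===== CLAIM (what is proved, stated in full; the proofs are below) =====
def Claim_equal_is_multi_fact_or_comparison_review_py : Prop := ∀ (entry : List (String × String)), Dom_is_multi_fact_or_comparison_review_py entry → Spec_is_multi_fact_or_comparison_review_py entry (is_multi_fact_or_comparison_review_py entry)

-- ===== LEMMAS AND PROOFS =====

-- PySem's fuelled splitter on a single-space separator is core splitOnP (· == ' ')
theorem pvSplitGoSpec (fuel : Nat) : ∀ (l cur : List Char) (acc : List (List Char)),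
    l.length ≤ fuel →
    PySem.Chars.splitOn.go [' '] fuel l cur acc =
      acc.reverse ++ (List.splitOnP (· == ' ') l).modifyHead (cur.reverse ++ ·) := by
  induction fuel with
  | zero =>
    intro l cur acc h
    have hl : l = [] := List.eq_nil_of_length_eq_zero (Nat.le_zero.mp h)
    subst hl
    simp [PySem.Chars.splitOn.go, List.splitOnP_nil]
  | succ fuel ih =>
    intro l cur acc h
    cases l with
    | nil => simp [PySem.Chars.splitOn.go, List.splitOnP_nil]
    | cons c rest =>
      by_cases hc : c = ' '
      · subst hc
        rw [show PySem.Chars.splitOn.go [' '] (fuel+1) (' '::rest) cur acc =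
              PySem.Chars.splitOn.go [' '] fuel rest [] (cur.reverse :: acc) from by
            simp [PySem.Chars.splitOn.go, List.isPrefixOf]]
        rw [ih rest [] _ (by simpa using Nat.le_of_succ_le_succ h)]
        rcases List.exists_cons_of_ne_nil (List.splitOnP_ne_nil (· == ' ') rest) with ⟨h0, t0, hst⟩
        simp [List.splitOnP_cons, hst]
      · rw [show PySem.Chars.splitOn.go [' '] (fuel+1) (c::rest) cur acc =
              PySem.Chars.splitOn.go [' '] fuel rest (c :: cur) acc from by
            simp [PySem.Chars.splitOn.go, List.isPrefixOf, Ne.symm hc]]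
        rw [ih rest (c :: cur) acc (by simpa using Nat.le_of_succ_le_succ h)]
        rcases List.exists_cons_of_ne_nil (List.splitOnP_ne_nil (· == ' ') rest) with ⟨h0, t0, hst⟩
        simp [List.splitOnP_cons, hc, hst]

theorem pvSplitOnSingleEq (q : List Char) :
    PySem.Chars.splitOn q [' '] = List.splitOnP (· == ' ') q := by
  rw [show PySem.Chars.splitOn q [' '] =
        PySem.Chars.splitOn.go [' '] (q.length + 1) q [] [] from rfl]
  rw [pvSplitGoSpec (q.length + 1) q [] [] (by omega)]
  rcases List.exists_cons_of_ne_nil (List.splitOnP_ne_nil (· == ' ') q) with ⟨h0, t0, hst⟩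
  simp [hst]

-- the first token of a split is the longest space-free prefix
theorem pvSplitHeadCons (q : List Char) :
    ∃ t, List.splitOnP (· == ' ') q = q.takeWhile (fun c => !(c == ' ')) :: t := by
  induction q with
  | nil => exact ⟨[], rfl⟩
  | cons c q ih =>
    rcases ih with ⟨t, ht⟩
    by_cases hc : c = ' '
    · subst hc
      exact ⟨List.splitOnP (· == ' ') q, by simp [List.splitOnP_cons, List.takeWhile_cons]⟩
    · exact ⟨t, by simp [List.splitOnP_cons, hc, ht, List.takeWhile_cons]⟩

-- 'w followed by a space' is a prefix of 'q followed by a space' iff w is q's first token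
theorem pvPrefixPadIff (w : List Char) : ∀ q : List Char, ' ' ∉ w →
    (((w ++ [' ']) <+: (q ++ [' '])) ↔ w = q.takeWhile (fun c => !(c == ' '))) := by
  induction w with
  | nil =>
    intro q _
    cases q with
    | nil => simp
    | cons c q' =>
      simp only [List.nil_append, List.cons_append]
      constructor
      · intro h
        rcases List.cons_prefix_cons.mp h with ⟨h1, _⟩
        simp [List.takeWhile_cons, ← h1]
      · intro h
        by_cases hc : c = ' '
        · subst hc; exact List.cons_prefix_cons.mpr ⟨rfl, by simp⟩
        · simp [List.takeWhile_cons, hc] at h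
  | cons a w' ih =>
    intro q hsp
    have ha : a ≠ ' ' := fun h => hsp (by simp [h])
    have hsp' : ' ' ∉ w' := fun h => hsp (List.mem_cons_of_mem _ h)
    cases q with
    | nil =>
      simp only [List.cons_append, List.nil_append]
      constructor
      · intro h
        rcases List.cons_prefix_cons.mp h with ⟨h1, _⟩
        exact absurd h1 ha
      · intro h; simp at h
    | cons c q' =>
      simp only [List.cons_append]
      rw [List.cons_prefix_cons]
      by_cases hc : c = ' '
      · subst hc
        constructor
        · rintro ⟨h1, _⟩; exact absurd h1 ha
        · intro h; simp [List.takeWhile_cons] at h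
      · rw [ih q' hsp']
        simp [List.takeWhile_cons, hc]

-- a space-padded word is an infix of 'q followed by a space' iff it is a non-first token of q
theorem pvInfixPadTail (w : List Char) (hw : w ≠ []) (hsp : ' ' ∉ w) :
    ∀ q : List Char,
      ((' ' :: (w ++ [' '])) <:+: (q ++ [' '])) ↔ w ∈ (List.splitOnP (· == ' ') q).tail := by
  intro q
  induction q with
  | nil =>
    simp only [List.nil_append]
    rw [List.splitOnP_nil, List.tail_cons]
    constructor
    · intro h
      have hl := h.length_le
      simp only [List.length_cons, List.length_append, List.length_nil] at hl
      omega
    · intro h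
      simp at h
  | cons c q' ih =>
    rw [List.cons_append, List.infix_cons_iff]
    by_cases hc : c = ' '
    · subst hc
      rw [List.cons_prefix_cons]
      rcases pvSplitHeadCons q' with ⟨t, ht⟩
      constructor
      · rintro (⟨_, hp⟩ | hi)
        · have := (pvPrefixPadIff w q' hsp).mp hp
          simp [List.splitOnP_cons, ht, this]
        · have := ih.mp hi
          simp only [List.splitOnP_cons] at *
          simp only [BEq.rfl, if_pos rfl, List.tail_cons]
          rw [ht] at this ⊢
          exact List.mem_cons_of_mem _ this
      · intro h
        simp only [List.splitOnP_cons, BEq.rfl, if_pos rfl, List.tail_cons, ht] at h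
        rcases List.mem_cons.mp h with h1 | h2
        · exact Or.inl ⟨rfl, (pvPrefixPadIff w q' hsp).mpr h1⟩
        · exact Or.inr (ih.mpr (by rw [ht]; simpa using h2))
    · rcases List.exists_cons_of_ne_nil (List.splitOnP_ne_nil (· == ' ') q') with ⟨h0, t0, hst⟩
      have hpre : ¬ ((' ' :: (w ++ [' '])) <+: (c :: (q' ++ [' ']))) := by
        intro h
        rcases List.cons_prefix_cons.mp h with ⟨h1, _⟩
        exact hc h1.symm
      simp only [List.splitOnP_cons, hc, beq_iff_eq, if_neg hc, hst, List.modifyHead_cons,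
        List.tail_cons]
      rw [hst, List.tail_cons] at ih
      constructor
      · rintro (h | h)
        · exact absurd h hpre
        · exact ih.mp h
      · intro h; exact Or.inr (ih.mpr h)

-- the padded-substring test of A equals B's token-set membership test
theorem pvIsInPadEq (w q : List Char) (hw : w ≠ []) (hsp : ' ' ∉ w) :
    PySem.Chars.isIn (' ' :: (w ++ [' '])) ([' '] ++ q ++ [' ']) =
      (PySem.Set.ofList (PySem.Chars.splitOn q [' '])).contains w := by
  rw [Bool.eq_iff_iff, PySem.Chars.isIn_iff_infix]
  rw [show [' '] ++ q ++ [' '] = (' ' :: q) ++ [' '] from by simp]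
  rw [pvInfixPadTail w hw hsp (' ' :: q)]
  simp [List.splitOnP_cons, List.contains_iff_mem, PySem.Set.mem_ofList, pvSplitOnSingleEq]

-- ===== VERDICT (by name: the statement is the Claim_ definition above) =====
theorem is_multi_fact_or_comparison_review_py_spec : Claim_equal_is_multi_fact_or_comparison_review_py := by
  unfold Claim_equal_is_multi_fact_or_comparison_review_py
  intro entry _
  unfold Spec_is_multi_fact_or_comparison_review_py
  unfold is_multi_fact_or_comparison_review_py is_multi_fact_or_comparison_review_py_alt
  have hset : PySem.Set.ofList pvMarkerWords = pvMarkerWords := by decide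
  rw [hset]
  generalize PySem.Chars.lower ((entry.lookup "question").getD "").toList = q
  have e1 : " compare ".toList = ' ' :: ("compare".toList ++ [' ']) := by decide
  have e2 : " comparison ".toList = ' ' :: ("comparison".toList ++ [' ']) := by decide
  have e3 : " difference ".toList = ' ' :: ("difference".toList ++ [' ']) := by decide
  have e4 : " differences ".toList = ' ' :: ("differences".toList ++ [' ']) := by decide
  have e5 : " vs ".toList = ' ' :: ("vs".toList ++ [' ']) := by decide
  have e6 : " versus ".toList = ' ' :: ("versus".toList ++ [' ']) := by decide
  have e7 : " both ".toList = ' ' :: ("both".toList ++ [' ']) := by decide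
  have e8 : " and ".toList = ' ' :: ("and".toList ++ [' ']) := by decide
  have e9 : " across ".toList = ' ' :: ("across".toList ++ [' ']) := by decide
  simp only [pvMarkerWords, List.any_cons, List.any_nil,
    e1, e2, e3, e4, e5, e6, e7, e8, e9]
  rw [pvIsInPadEq "compare".toList q (by decide) (by decide),
    pvIsInPadEq "comparison".toList q (by decide) (by decide),
    pvIsInPadEq "difference".toList q (by decide) (by decide),
    pvIsInPadEq "differences".toList q (by decide) (by decide),
    pvIsInPadEq "vs".toList q (by decide) (by decide),
    pvIsInPadEq "versus".toList q (by decide) (by decide),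
    pvIsInPadEq "both".toList q (by decide) (by decide),
    pvIsInPadEq "and".toList q (by decide) (by decide),
    pvIsInPadEq "across".toList q (by decide) (by decide)]
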